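-- pv_equiv track=rewrite | github.com/Mdlee404/ThemeShop | scripts/build_theme_index.py | pick_preview
-- ===== SOURCE A (Python) =====
-- PREVIEW_CANDIDATES = (
--     "preview.png",
--     "preview.jpg",
--     "preview.jpeg",
--     "preview.webp",
--     "preview.gif",
-- )
--
-- def pick_preview(images: list[str]) -> str | None:
--     lowered = {image.lower(): image for image in images}
--     for candidate in PREVIEW_CANDIDATES:
--         if candidate in lowered:
--             return lowered[candidate]
--
--     for image in images:
--         if "preview" in image.lower():
--             return image
--     return images[0] if images else None
-- ===== SOURCE B (Python) =====
-- PREVIEW_CANDIDATES = (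
--     "preview.png",
--     "preview.jpg",
--     "preview.jpeg",
--     "preview.webp",
--     "preview.gif",
-- )
--
--
-- def pick_preview(images: list[str]) -> str | None:
--     # Single pass over images: keep the best exact candidate as (rank, image)
--     # (minimal rank; on equal rank the later image wins, matching the
--     # last-duplicate-wins dict of the original), and the first image whose
--     # lowercase contains "preview".
--     prio = {name: i for i, name in enumerate(PREVIEW_CANDIDATES)}
--     best = None
--     first_sub = None
--     for image in images:
--         low = image.lower()
--         r = prio.get(low)
--         if r is not None and (best is None or r <= best[0]):
--             best = (r, image)
--         if first_sub is None and "preview" in low: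
--             first_sub = image
--     if best is not None:
--         return best[1]
--     if first_sub is not None:
--         return first_sub
--     return images[0] if images else None
-- ===== Notes on version B (the rewrite author's own statement) =====
-- stated objective: alternative
-- what changed: Replaces the build-a-dict-then-scan-candidates-then-rescan-images structure with one single pass over images that maintains the minimal-rank exact candidate (last-wins on ties) and the first 'preview'-substring match.
import Mathlib
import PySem

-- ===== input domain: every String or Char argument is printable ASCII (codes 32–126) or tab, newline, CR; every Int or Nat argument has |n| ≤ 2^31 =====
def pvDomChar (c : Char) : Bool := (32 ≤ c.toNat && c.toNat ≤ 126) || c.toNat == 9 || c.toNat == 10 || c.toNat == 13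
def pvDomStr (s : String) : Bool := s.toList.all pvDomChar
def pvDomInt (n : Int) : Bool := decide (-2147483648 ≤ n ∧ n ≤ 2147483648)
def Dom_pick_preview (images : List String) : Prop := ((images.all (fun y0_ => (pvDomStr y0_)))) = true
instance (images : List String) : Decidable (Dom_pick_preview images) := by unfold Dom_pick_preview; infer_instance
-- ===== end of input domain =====

-- B replaces A's dict-then-candidate-scan-then-rescan with one single pass over images (same O(n) cost, one traversal).

-- ===== PORT A =====
def PREVIEW_CANDIDATES : List String :=
  ["preview.png", "preview.jpg", "preview.jpeg", "preview.webp", "preview.gif"]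

-- 'for candidate in PREVIEW_CANDIDATES: if candidate in lowered: return lowered[candidate]'
def pickCandLoop (lowered : PySem.Dict String String) : List String → Option String
  | [] => none
  | c :: rest => if lowered.contains c then lowered.get? c else pickCandLoop lowered rest

-- 'for image in images: if "preview" in image.lower(): return image'
def pickSubLoop : List String → Option String
  | [] => none
  | image :: rest =>
      if PySem.Str.isIn "preview" (PySem.Str.lower image) then some image else pickSubLoop rest

def pick_preview (images : List String) : Option String :=
  let lowered : PySem.Dict String String :=
    images.foldl (fun d image => d.insert (PySem.Str.lower image) image) PySem.Dict.empty
  match pickCandLoop lowered PREVIEW_CANDIDATES with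
  | some v => some v
  | none =>
    match pickSubLoop images with
    | some v => some v
    | none => match images with
      | [] => none
      | x :: _ => some x

-- ===== PORT B =====
-- prio = {name: i for i, name in enumerate(PREVIEW_CANDIDATES)}
def prioDict : PySem.Dict String Int :=
  (PySem.List.enumerate PREVIEW_CANDIDATES 0).foldl (fun d p => d.insert p.2 p.1) PySem.Dict.empty

-- one loop iteration over the state (best, first_sub)
def altStep (st : Option (Int × String) × Option String) (image : String) :
    Option (Int × String) × Option String :=
  let low := PySem.Str.lower image
  let best :=
    match prioDict.get? low with
    | some r =>
      match st.1 with
      | none => some (r, image)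
      | some b => if r ≤ b.1 then some (r, image) else st.1
    | none => st.1
  let first_sub :=
    match st.2 with
    | none => if PySem.Str.isIn "preview" low then some image else none
    | some _ => st.2
  (best, first_sub)

def pick_preview_alt (images : List String) : Option String :=
  let st := images.foldl altStep (none, none)
  match st.1 with
  | some b => some b.2
  | none =>
    match st.2 with
    | some s => some s
    | none => match images with
      | [] => none
      | x :: _ => some x

-- ===== PRECONDITION & SPEC =====
def Spec_pick_preview (images : List String) (out : Option String) : Prop := out = pick_preview_alt images
instance (images : List String) (out : Option String) : Decidable (Spec_pick_preview images out) := by unfold Spec_pick_preview; infer_instance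

-- ===== CLAIM (what is proved, stated in full; the proofs are below) =====
def Claim_equal_pick_preview : Prop := ∀ (images : List String), Dom_pick_preview images → Spec_pick_preview images (pick_preview images)

-- ===== LEMMAS AND PROOFS =====

-- last image of l whose lowercase is c
def lastM (c : String) (l : List String) : Option String :=
  (l.filter (fun i => PySem.Str.lower i == c)).getLast?

-- the winning (rank, image): first candidate (in order) matched, with the last matching image
def bestSpec (l : List String) : Option (Int × String) :=
  match lastM "preview.png" l with
  | some v => some (0, v)
  | none => match lastM "preview.jpg" l with
    | some v => some (1, v)
    | none => match lastM "preview.jpeg" l with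
      | some v => some (2, v)
      | none => match lastM "preview.webp" l with
        | some v => some (3, v)
        | none => match lastM "preview.gif" l with
          | some v => some (4, v)
          | none => none

theorem lastM_concat (c x : String) (l : List String) :
    lastM c (l ++ [x]) = if PySem.Str.lower x = c then some x else lastM c l := by
  unfold lastM
  rw [List.filter_append]
  by_cases h : PySem.Str.lower x = c
  · simp [h]
  · simp [h]

theorem dict_get?_char (l : List String) (d : PySem.Dict String String) (c : String) :
    (l.foldl (fun d image => d.insert (PySem.Str.lower image) image) d).get? c
      = (lastM c l).or (d.get? c) := by
  induction l generalizing d with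
  | nil => simp [lastM]
  | cons x l ih =>
    simp only [List.foldl_cons, ih]
    unfold lastM
    simp only [List.filter_cons, PySem.Dict.get?_insert]
    by_cases h : PySem.Str.lower x = c
    · simp only [h, beq_self_eq_true, if_pos]
      cases hf : (l.filter (fun i => PySem.Str.lower i == c)).getLast? with
      | none => rw [List.getLast?_cons, hf]; rfl
      | some v => rw [List.getLast?_cons, hf]; rfl
    · have h' : c ≠ PySem.Str.lower x := fun hc => h hc.symm
      simp [h, h']

theorem prioDict_eq : prioDict = PySem.Dict.mk
    [("preview.png", 0), ("preview.jpg", 1), ("preview.jpeg", 2),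
     ("preview.webp", 3), ("preview.gif", 4)] := by
  decide

theorem prioDict_get? (s : String) :
    prioDict.get? s =
      if s = "preview.png" then some 0 else
      if s = "preview.jpg" then some 1 else
      if s = "preview.jpeg" then some 2 else
      if s = "preview.webp" then some 3 else
      if s = "preview.gif" then some 4 else none := by
  have hb : ∀ (a b : String), ((a == b) = true) = (b = a) := by
    intro a b
    exact propext ⟨fun h => (beq_iff_eq.mp h).symm, fun h => beq_iff_eq.mpr h.symm⟩
  rw [prioDict_eq]
  simp only [PySem.Dict.get?_mk_cons, hb]
  rfl

theorem pickCandLoop_eq (l : List String) :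
    pickCandLoop (l.foldl (fun d image => d.insert (PySem.Str.lower image) image) PySem.Dict.empty)
        PREVIEW_CANDIDATES
      = (bestSpec l).map (·.2) := by
  have hg : ∀ c, (l.foldl (fun d image => d.insert (PySem.Str.lower image) image)
      PySem.Dict.empty).get? c = lastM c l := by
    intro c; rw [dict_get?_char]; simp
  simp only [PREVIEW_CANDIDATES, pickCandLoop, PySem.Dict.contains_eq_isSome_get?, hg, bestSpec]
  rcases h1 : lastM "preview.png" l with _ | v1 <;>
    rcases h2 : lastM "preview.jpg" l with _ | v2 <;>
    rcases h3 : lastM "preview.jpeg" l with _ | v3 <;>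
    rcases h4 : lastM "preview.webp" l with _ | v4 <;>
    rcases h5 : lastM "preview.gif" l with _ | v5 <;>
    simp [h1, h2, h3, h4, h5]

theorem foldl_altStep_pair (l : List String) (a : Option (Int × String)) (b : Option String) :
    l.foldl altStep (a, b)
      = (l.foldl (fun st image =>
            match prioDict.get? (PySem.Str.lower image) with
            | some r =>
              match st with
              | none => some (r, image)
              | some bb => if r ≤ bb.1 then some (r, image) else st
            | none => st) a,
         l.foldl (fun st image =>
            match st with
            | none => if PySem.Str.isIn "preview" (PySem.Str.lower image) then some image else none
            | some _ => st) b) := by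
  induction l generalizing a b with
  | nil => rfl
  | cons x l ih => simp only [List.foldl_cons, altStep, ih]

theorem bestSpec_concat (l : List String) (x : String) :
    bestSpec (l ++ [x])
      = (match prioDict.get? (PySem.Str.lower x) with
         | some r =>
           match bestSpec l with
           | none => some (r, x)
           | some bb => if r ≤ bb.1 then some (r, x) else bestSpec l
         | none => bestSpec l) := by
  rw [prioDict_get?]
  by_cases e1 : PySem.Str.lower x = "preview.png" <;>
    by_cases e2 : PySem.Str.lower x = "preview.jpg" <;>
    by_cases e3 : PySem.Str.lower x = "preview.jpeg" <;>
    by_cases e4 : PySem.Str.lower x = "preview.webp" <;>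
    by_cases e5 : PySem.Str.lower x = "preview.gif" <;>
    simp only [bestSpec, lastM_concat, e1, e2, e3, e4, e5] <;>
    simp_all <;>
    rcases h1 : lastM "preview.png" l with _ | v1 <;>
    rcases h2 : lastM "preview.jpg" l with _ | v2 <;>
    rcases h3 : lastM "preview.jpeg" l with _ | v3 <;>
    rcases h4 : lastM "preview.webp" l with _ | v4 <;>
    rcases h5 : lastM "preview.gif" l with _ | v5 <;>
    simp [h1, h2, h3, h4, h5]

theorem bestFold_eq (l : List String) :
    l.foldl (fun st image =>
        match prioDict.get? (PySem.Str.lower image) with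
        | some r =>
          match st with
          | none => some (r, image)
          | some bb => if r ≤ bb.1 then some (r, image) else st
        | none => st) none
      = bestSpec l := by
  induction l using List.reverseRecOn with
  | nil => simp [bestSpec, lastM]
  | append_singleton l x ih => rw [List.foldl_append, List.foldl_cons, List.foldl_nil,
      bestSpec_concat, ih]

theorem subFold_eq (l : List String) :
    l.foldl (fun st image =>
        match st with
        | none => if PySem.Str.isIn "preview" (PySem.Str.lower image) then some image else none
        | some _ => st) none
      = pickSubLoop l := by
  have hstay : ∀ (l : List String) (v : String),
      l.foldl (fun st image =>
        match st with
        | none => if PySem.Str.isIn "preview" (PySem.Str.lower image) then some image else none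
        | some _ => st) (some v) = some v := by
    intro l v
    induction l with
    | nil => rfl
    | cons x l ih => simpa using ih
  induction l with
  | nil => rfl
  | cons x l ih =>
    simp only [List.foldl_cons]
    by_cases h : PySem.Str.isIn "preview" (PySem.Str.lower x) = true
    · show List.foldl _
        (if PySem.Str.isIn "preview" (PySem.Str.lower x) = true then some x else none) l = _
      rw [if_pos h, hstay]
      simp only [pickSubLoop, if_pos h]
    · show List.foldl _
        (if PySem.Str.isIn "preview" (PySem.Str.lower x) = true then some x else none) l = _
      rw [if_neg h, ih]
      simp only [pickSubLoop, if_neg h]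

-- ===== VERDICT (by name: the statement is the Claim_ definition above) =====
theorem pick_preview_spec : Claim_equal_pick_preview := by
  intro images _
  unfold Spec_pick_preview
  simp only [pick_preview, pick_preview_alt, foldl_altStep_pair, bestFold_eq, subFold_eq,
    pickCandLoop_eq]
  cases h : bestSpec images <;> simp
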